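-- pv_equiv track=rewrite | github.com/staurus86/seo-tools-platform | app/tools/llmCrawler/patterns.py | _infer_page_type
-- ===== SOURCE A (Python) =====
-- from typing import Any, Dict, List, Set
--
-- SCHEMA_TYPE_GROUPS: Dict[str, Set[str]] = {
--     "organization": {
--         "organization",
--         "corporation",
--         "ngo",
--         "governmentorganization",
--         "educationalorganization",
--         "localbusiness",
--         "brand",
--         "publisher",
--     },
--     "person": {"person"},
--     "article": {
--         "article",
--         "newsarticle",
--         "blogposting",
--         "techarticle",
--         "analysisnewsarticle",
--         "report",
--         "liveblogposting",
--         "scholarlyarticle",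
--     },
--     "product": {"product", "productmodel", "individualproduct", "service"},
--     "offer": {"offer", "aggregateoffer", "demand"},
--     "review": {"review", "aggregaterating", "rating", "criticreview", "userreview"},
--     "faq": {"faqpage", "qapage", "question", "answer"},
--     "breadcrumb": {"breadcrumblist", "listitem"},
--     "itemlist": {"itemlist", "collectionpage"},
--     "howto": {"howto", "howtosection", "howtostep"},
--     "event": {"event", "sportsEvent".lower(), "musicevent"},
--     "job": {"jobposting"},
--     "video": {"videoobject"},
--     "recipe": {"recipe"},
--     "website": {"website", "webpage"},
-- }
--
-- def _infer_page_type(text: str, schema_idx: Set[str]) -> str: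
--     raw = str(text or "").lower()
--     if schema_idx & SCHEMA_TYPE_GROUPS["product"]:
--         return "product"
--     if schema_idx & SCHEMA_TYPE_GROUPS["review"]:
--         return "review"
--     if schema_idx & SCHEMA_TYPE_GROUPS["faq"]:
--         return "faq"
--     if schema_idx & SCHEMA_TYPE_GROUPS["article"]:
--         return "article"
--     if schema_idx & SCHEMA_TYPE_GROUPS["itemlist"]:
--         return "listing"
--     if any(tok in raw for tok in ("news", "latest", "feed", "лента", "новости")):
--         return "news"
--     if any(tok in raw for tok in ("docs", "documentation", "api", "руководство", "документац")):
--         return "docs"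
--     if any(tok in raw for tok in ("service", "services", "agency", "consulting", "услуги")):
--         return "service"
--     if any(tok in raw for tok in ("catalog", "category", "категор", "products")):
--         return "category"
--     return "unknown"
-- ===== SOURCE B (Python) =====
-- # Inverted-index re-implementation: one dict lookup per schema type plus one flat
-- # token scan collect (rank, label) hits; the answer is the label of the minimal rank.
-- _SCHEMA_RANK = {
--     "product": (0, "product"), "productmodel": (0, "product"),
--     "individualproduct": (0, "product"), "service": (0, "product"),
--     "review": (1, "review"), "aggregaterating": (1, "review"), "rating": (1, "review"),
--     "criticreview": (1, "review"), "userreview": (1, "review"),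
--     "faqpage": (2, "faq"), "qapage": (2, "faq"), "question": (2, "faq"), "answer": (2, "faq"),
--     "article": (3, "article"), "newsarticle": (3, "article"), "blogposting": (3, "article"),
--     "techarticle": (3, "article"), "analysisnewsarticle": (3, "article"),
--     "report": (3, "article"), "liveblogposting": (3, "article"), "scholarlyarticle": (3, "article"),
--     "itemlist": (4, "listing"), "collectionpage": (4, "listing"),
-- }
--
-- _TOKEN_RULES = [
--     ("news", 5, "news"), ("latest", 5, "news"), ("feed", 5, "news"),
--     ("лента", 5, "news"), ("новости", 5, "news"),
--     ("docs", 6, "docs"), ("documentation", 6, "docs"), ("api", 6, "docs"),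
--     ("руководство", 6, "docs"), ("документац", 6, "docs"),
--     ("service", 7, "service"), ("services", 7, "service"), ("agency", 7, "service"),
--     ("consulting", 7, "service"), ("услуги", 7, "service"),
--     ("catalog", 8, "category"), ("category", 8, "category"),
--     ("категор", 8, "category"), ("products", 8, "category"),
-- ]
--
-- def _infer_page_type(text, schema_idx):
--     raw = str(text or "").lower()
--     hits = [_SCHEMA_RANK[s] for s in schema_idx if s in _SCHEMA_RANK]
--     hits += [(rank, label) for tok, rank, label in _TOKEN_RULES if tok in raw]
--     best = min(hits, key=lambda h: h[0], default=None)
--     return best[1] if best is not None else "unknown"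
-- ===== Notes on version B (the rewrite author's own statement) =====
-- stated objective: alternative
-- what changed: B replaces A's ordered if-cascade of set intersections and any() scans by an inverted index: a dict mapping each schema type to a (rank,label) pair plus a flat token rule list collect all matching (rank,label) hits, and the answer is the label of the minimal rank (unknown if no hit).
import Mathlib
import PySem

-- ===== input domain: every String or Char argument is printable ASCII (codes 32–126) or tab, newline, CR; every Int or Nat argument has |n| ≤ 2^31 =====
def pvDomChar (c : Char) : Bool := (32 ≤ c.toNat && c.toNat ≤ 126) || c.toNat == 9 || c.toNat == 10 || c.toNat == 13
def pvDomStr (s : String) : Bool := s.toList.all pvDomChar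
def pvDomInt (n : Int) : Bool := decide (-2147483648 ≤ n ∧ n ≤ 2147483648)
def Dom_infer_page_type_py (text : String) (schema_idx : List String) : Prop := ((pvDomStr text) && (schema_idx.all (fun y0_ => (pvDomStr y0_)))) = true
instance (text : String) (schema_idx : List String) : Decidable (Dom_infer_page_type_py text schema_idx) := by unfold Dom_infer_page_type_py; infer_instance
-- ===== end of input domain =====

-- B replaces A's ordered if-cascade of group checks by an inverted index: one dict lookup
-- per schema type plus one flat token scan collect (rank, label) hits, answer = label of
-- the minimal rank; objective: alternative algorithm, no speed claim.

-- ===== PORT A =====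
-- the module constant SCHEMA_TYPE_GROUPS (a dict of sets; sets are PySem.Set = distinct-element lists)
def pvGroups : PySem.Dict String (List String) := PySem.Dict.ofList
  [ ("organization", ["organization", "corporation", "ngo", "governmentorganization",
      "educationalorganization", "localbusiness", "brand", "publisher"])
  , ("person", ["person"])
  , ("article", ["article", "newsarticle", "blogposting", "techarticle",
      "analysisnewsarticle", "report", "liveblogposting", "scholarlyarticle"])
  , ("product", ["product", "productmodel", "individualproduct", "service"])
  , ("offer", ["offer", "aggregateoffer", "demand"])
  , ("review", ["review", "aggregaterating", "rating", "criticreview", "userreview"])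
  , ("faq", ["faqpage", "qapage", "question", "answer"])
  , ("breadcrumb", ["breadcrumblist", "listitem"])
  , ("itemlist", ["itemlist", "collectionpage"])
  , ("howto", ["howto", "howtosection", "howtostep"])
  , ("event", ["event", "sportsevent", "musicevent"])
  , ("job", ["jobposting"])
  , ("video", ["videoobject"])
  , ("recipe", ["recipe"])
  , ("website", ["website", "webpage"]) ]

def infer_page_type_py (text : String) (schema_idx : List String) : String :=
  -- raw = str(text or "").lower()
  let raw := PySem.Str.lower (if text = "" then "" else text)
  if PySem.Set.inter schema_idx (pvGroups.getD "product" []) ≠ [] then "product"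
  else if PySem.Set.inter schema_idx (pvGroups.getD "review" []) ≠ [] then "review"
  else if PySem.Set.inter schema_idx (pvGroups.getD "faq" []) ≠ [] then "faq"
  else if PySem.Set.inter schema_idx (pvGroups.getD "article" []) ≠ [] then "article"
  else if PySem.Set.inter schema_idx (pvGroups.getD "itemlist" []) ≠ [] then "listing"
  else if ["news", "latest", "feed", "лента", "новости"].any (fun tok => PySem.Str.isIn tok raw) then "news"
  else if ["docs", "documentation", "api", "руководство", "документац"].any (fun tok => PySem.Str.isIn tok raw) then "docs"
  else if ["service", "services", "agency", "consulting", "услуги"].any (fun tok => PySem.Str.isIn tok raw) then "service"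
  else if ["catalog", "category", "категор", "products"].any (fun tok => PySem.Str.isIn tok raw) then "category"
  else "unknown"

-- ===== PORT B =====
-- the module constant _SCHEMA_RANK: inverted index schema type -> (rank, label)
def pvSchemaRank : PySem.Dict String (Nat × String) := PySem.Dict.ofList
  [ ("product", (0, "product")), ("productmodel", (0, "product")),
    ("individualproduct", (0, "product")), ("service", (0, "product")),
    ("review", (1, "review")), ("aggregaterating", (1, "review")), ("rating", (1, "review")),
    ("criticreview", (1, "review")), ("userreview", (1, "review")),
    ("faqpage", (2, "faq")), ("qapage", (2, "faq")), ("question", (2, "faq")), ("answer", (2, "faq")),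
    ("article", (3, "article")), ("newsarticle", (3, "article")), ("blogposting", (3, "article")),
    ("techarticle", (3, "article")), ("analysisnewsarticle", (3, "article")),
    ("report", (3, "article")), ("liveblogposting", (3, "article")), ("scholarlyarticle", (3, "article")),
    ("itemlist", (4, "listing")), ("collectionpage", (4, "listing")) ]

-- the module constant _TOKEN_RULES: flat list of (token, rank, label)
def pvTokenRules : List (String × Nat × String) :=
  [ ("news", 5, "news"), ("latest", 5, "news"), ("feed", 5, "news"),
    ("лента", 5, "news"), ("новости", 5, "news"),
    ("docs", 6, "docs"), ("documentation", 6, "docs"), ("api", 6, "docs"),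
    ("руководство", 6, "docs"), ("документац", 6, "docs"),
    ("service", 7, "service"), ("services", 7, "service"), ("agency", 7, "service"),
    ("consulting", 7, "service"), ("услуги", 7, "service"),
    ("catalog", 8, "category"), ("category", 8, "category"),
    ("категор", 8, "category"), ("products", 8, "category") ]

-- the token-rule filter of the second list comprehension
def pvTokF (raw : String) : String × Nat × String → Option (Nat × String) :=
  fun tr => if PySem.Str.isIn tr.1 raw then some (tr.2.1, tr.2.2) else none

-- hits = [_SCHEMA_RANK[s] for s in schema_idx if s in _SCHEMA_RANK] + [(rank, label) for ... if tok in raw]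
def pvHits (raw : String) (schema_idx : List String) : List (Nat × String) :=
  schema_idx.filterMap (fun s => pvSchemaRank.get? s) ++ pvTokenRules.filterMap (pvTokF raw)

-- best = min(hits, key=..., default=None); return best[1] if best is not None else "unknown"
def pvPick (hits : List (Nat × String)) : String :=
  match PySem.List.min? hits (fun h => h.1) with
  | some best => best.2
  | none => "unknown"

def infer_page_type_py_alt (text : String) (schema_idx : List String) : String :=
  let raw := PySem.Str.lower (if text = "" then "" else text)
  pvPick (pvHits raw schema_idx)

-- ===== PRECONDITION & SPEC =====
def Spec_infer_page_type_py (text : String) (schema_idx : List String) (out : String) : Prop := out = infer_page_type_py_alt text schema_idx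
instance (text : String) (schema_idx : List String) (out : String) : Decidable (Spec_infer_page_type_py text schema_idx out) := by unfold Spec_infer_page_type_py; infer_instance

-- ===== CLAIM (what is proved, stated in full; the proofs are below) =====
def Claim_equal_infer_page_type_py : Prop := ∀ (text : String) (schema_idx : List String), Dom_infer_page_type_py text schema_idx → Spec_infer_page_type_py text schema_idx (infer_page_type_py text schema_idx)

-- ===== LEMMAS AND PROOFS =====

-- the five schema groups A tests, indexed by B's rank, and the four token groups
def pvG : Nat → List String
  | 0 => ["product", "productmodel", "individualproduct", "service"]
  | 1 => ["review", "aggregaterating", "rating", "criticreview", "userreview"]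
  | 2 => ["faqpage", "qapage", "question", "answer"]
  | 3 => ["article", "newsarticle", "blogposting", "techarticle",
          "analysisnewsarticle", "report", "liveblogposting", "scholarlyarticle"]
  | _ => ["itemlist", "collectionpage"]

def pvT : Nat → List String
  | 5 => ["news", "latest", "feed", "лента", "новости"]
  | 6 => ["docs", "documentation", "api", "руководство", "документац"]
  | 7 => ["service", "services", "agency", "consulting", "услуги"]
  | _ => ["catalog", "category", "категор", "products"]

def pvLab : Nat → String
  | 0 => "product" | 1 => "review" | 2 => "faq" | 3 => "article" | 4 => "listing"
  | 5 => "news" | 6 => "docs" | 7 => "service" | _ => "category"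

lemma pv_inter_ne_nil_iff (sx g : List String) :
    PySem.Set.inter sx g ≠ [] ↔ ∃ s ∈ sx, s ∈ g := by
  simp [PySem.Set.inter, List.filter_eq_nil_iff]

set_option maxHeartbeats 1000000 in
lemma pv_rank_of_mem (i : Nat) (hi : i < 5) (s : String) (hs : s ∈ pvG i) :
    pvSchemaRank.get? s = some (i, pvLab i) := by
  interval_cases i <;> fin_cases hs <;> decide

set_option maxHeartbeats 2000000 in
lemma pv_mem_of_rank (s : String) (p : Nat × String) (h : pvSchemaRank.get? s = some p) :
    p.1 < 5 ∧ p.2 = pvLab p.1 ∧ s ∈ pvG p.1 := by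
  have hi : ∃ pr ∈ pvSchemaRank.items, (pr.1 == s) = true ∧ pr.2 = p := by
    simp only [PySem.Dict.get?, Option.map_eq_some_iff] at h
    obtain ⟨pr, hf, h2⟩ := h
    exact ⟨pr, List.mem_of_find?_eq_some hf, by simpa using List.find?_some hf, h2⟩
  have hitems : pvSchemaRank.items =
    [ ("product", (0, "product")), ("productmodel", (0, "product")),
      ("individualproduct", (0, "product")), ("service", (0, "product")),
      ("review", (1, "review")), ("aggregaterating", (1, "review")), ("rating", (1, "review")),
      ("criticreview", (1, "review")), ("userreview", (1, "review")),
      ("faqpage", (2, "faq")), ("qapage", (2, "faq")), ("question", (2, "faq")), ("answer", (2, "faq")),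
      ("article", (3, "article")), ("newsarticle", (3, "article")), ("blogposting", (3, "article")),
      ("techarticle", (3, "article")), ("analysisnewsarticle", (3, "article")),
      ("report", (3, "article")), ("liveblogposting", (3, "article")), ("scholarlyarticle", (3, "article")),
      ("itemlist", (4, "listing")), ("collectionpage", (4, "listing")) ] := by decide
  rw [hitems] at hi
  obtain ⟨pr, hmem, hbeq, hp⟩ := hi
  rw [beq_iff_eq] at hbeq
  subst hbeq; subst hp
  fin_cases hmem <;> decide

set_option maxHeartbeats 1000000 in
lemma pv_tok_hit (raw : String) (p : Nat × String) (h : p ∈ pvTokenRules.filterMap (pvTokF raw)) :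
    5 ≤ p.1 ∧ p.1 < 9 ∧ p.2 = pvLab p.1 ∧ ∃ t ∈ pvT p.1, PySem.Str.isIn t raw = true := by
  rw [List.mem_filterMap] at h
  obtain ⟨tr, htr, hf⟩ := h
  fin_cases htr <;>
    (simp only [pvTokF] at hf; split_ifs at hf with hi; cases hf;
     refine ⟨by omega, by omega, by rfl, ?_⟩; exact ⟨_, by decide, hi⟩)

set_option maxHeartbeats 1000000 in
lemma pv_tok_of_any (j : Nat) (hj : 5 ≤ j) (hj9 : j < 9) (raw : String)
    (h : ∃ t ∈ pvT j, PySem.Str.isIn t raw = true) :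
    (j, pvLab j) ∈ pvTokenRules.filterMap (pvTokF raw) := by
  obtain ⟨t, ht, hin⟩ := h
  rw [List.mem_filterMap]
  interval_cases j <;> fin_cases ht <;>
    (simp [PySem.Str.isIn_eq] at hin; simp [pvTokenRules, pvTokF, pvLab, hin])

lemma pv_pick_eq (raw : String) (sx : List String) (k : Nat)
    (hk : (k, pvLab k) ∈ pvHits raw sx)
    (hmin : ∀ p ∈ pvHits raw sx, k ≤ p.1)
    (hlab : ∀ p ∈ pvHits raw sx, p.1 = k → p.2 = pvLab k) :
    pvPick (pvHits raw sx) = pvLab k := by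
  unfold pvPick
  cases hm : PySem.List.min? (pvHits raw sx) (fun h => h.1) with
  | none =>
      rw [PySem.List.min?_eq_none_iff] at hm
      rw [hm] at hk; cases hk
  | some m =>
      have hmem := PySem.List.min?_mem hm
      have h1 : m.1 ≤ k := PySem.List.min?_isMin hm _ hk
      have h2 : k ≤ m.1 := hmin m hmem
      exact hlab m hmem (by omega)

-- membership in hits splits into a schema hit and a token hit
lemma pv_mem_hits (raw : String) (sx : List String) (p : Nat × String) (h : p ∈ pvHits raw sx) :
    (∃ s ∈ sx, pvSchemaRank.get? s = some p) ∨ p ∈ pvTokenRules.filterMap (pvTokF raw) := by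
  rcases List.mem_append.mp h with h | h
  · exact Or.inl (List.mem_filterMap.mp h)
  · exact Or.inr h

lemma pv_schema_hit_of (i : Nat) (hi : i < 5) (sx : List String)
    (h : ∃ s ∈ sx, s ∈ pvG i) (raw : String) : (i, pvLab i) ∈ pvHits raw sx := by
  obtain ⟨s, hs, hg⟩ := h
  exact List.mem_append.mpr (Or.inl (List.mem_filterMap.mpr ⟨s, hs, pv_rank_of_mem i hi s hg⟩))

lemma pv_tok_hit_of (j : Nat) (hj : 5 ≤ j) (hj9 : j < 9) (raw : String) (sx : List String)
    (h : ∃ t ∈ pvT j, PySem.Str.isIn t raw = true) : (j, pvLab j) ∈ pvHits raw sx :=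
  List.mem_append.mpr (Or.inr (pv_tok_of_any j hj hj9 raw h))


lemma pv_negS {sx g : List String} (h : ¬ PySem.Set.inter sx g ≠ []) : ¬ ∃ s ∈ sx, s ∈ g :=
  fun hex => h ((pv_inter_ne_nil_iff sx g).mpr hex)

lemma pv_posS {sx g : List String} (h : PySem.Set.inter sx g ≠ []) : ∃ s ∈ sx, s ∈ g :=
  (pv_inter_ne_nil_iff sx g).mp h

lemma pv_negT {toks : List String} {raw : String}
    (h : ¬ (toks.any (fun tok => PySem.Str.isIn tok raw)) = true) :
    ¬ ∃ t ∈ toks, PySem.Str.isIn t raw = true :=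
  fun ⟨t, ht, hin⟩ => h (List.any_eq_true.mpr ⟨t, ht, hin⟩)

lemma pv_posT {toks : List String} {raw : String}
    (h : (toks.any (fun tok => PySem.Str.isIn tok raw)) = true) :
    ∃ t ∈ toks, PySem.Str.isIn t raw = true := List.any_eq_true.mp h

lemma pv_main (raw : String) (sx : List String) (k : Nat) (hk9 : k < 9)
    (hcondS : k < 5 → ∃ s ∈ sx, s ∈ pvG k)
    (hcondT : 5 ≤ k → ∃ t ∈ pvT k, PySem.Str.isIn t raw = true)
    (hnotS : ∀ i, i < k → i < 5 → ¬ ∃ s ∈ sx, s ∈ pvG i)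
    (hnotT : ∀ i, i < k → 5 ≤ i → ¬ ∃ t ∈ pvT i, PySem.Str.isIn t raw = true) :
    pvPick (pvHits raw sx) = pvLab k := by
  have hk : (k, pvLab k) ∈ pvHits raw sx := by
    by_cases h5 : k < 5
    · exact pv_schema_hit_of k h5 sx (hcondS h5) raw
    · exact pv_tok_hit_of k (by omega) hk9 raw sx (hcondT (by omega))
  apply pv_pick_eq raw sx k hk
  · intro p hp
    rcases pv_mem_hits raw sx p hp with ⟨s, hs, hget⟩ | htok
    · obtain ⟨h5, _, hgrp⟩ := pv_mem_of_rank s p hget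
      by_contra hlt
      exact hnotS p.1 (by omega) h5 ⟨s, hs, hgrp⟩
    · obtain ⟨h5le, _, _, t, ht, hin⟩ := pv_tok_hit raw p htok
      by_contra hlt
      exact hnotT p.1 (by omega) h5le ⟨t, ht, hin⟩
  · intro p hp hpk
    rcases pv_mem_hits raw sx p hp with ⟨s, hs, hget⟩ | htok
    · obtain ⟨_, hlabp, _⟩ := pv_mem_of_rank s p hget
      rw [hlabp, hpk]
    · obtain ⟨_, _, hlabp, _⟩ := pv_tok_hit raw p htok
      rw [hlabp, hpk]

lemma pv_main_none (raw : String) (sx : List String)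
    (hnotS : ∀ i, i < 5 → ¬ ∃ s ∈ sx, s ∈ pvG i)
    (hnotT : ∀ i, 5 ≤ i → i < 9 → ¬ ∃ t ∈ pvT i, PySem.Str.isIn t raw = true) :
    pvPick (pvHits raw sx) = "unknown" := by
  have hnil : pvHits raw sx = [] := by
    rw [List.eq_nil_iff_forall_not_mem]
    intro p hp
    rcases pv_mem_hits raw sx p hp with ⟨s, hs, hget⟩ | htok
    · obtain ⟨h5, _, hgrp⟩ := pv_mem_of_rank s p hget
      exact hnotS p.1 h5 ⟨s, hs, hgrp⟩
    · obtain ⟨h5, h9, _, t, ht, hin⟩ := pv_tok_hit raw p htok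
      exact hnotT p.1 h5 h9 ⟨t, ht, hin⟩
  rw [hnil]; rfl

set_option maxHeartbeats 2000000 in
lemma pv_cascade (raw : String) (sx : List String) :
    (if PySem.Set.inter sx (pvGroups.getD "product" []) ≠ [] then "product"
     else if PySem.Set.inter sx (pvGroups.getD "review" []) ≠ [] then "review"
     else if PySem.Set.inter sx (pvGroups.getD "faq" []) ≠ [] then "faq"
     else if PySem.Set.inter sx (pvGroups.getD "article" []) ≠ [] then "article"
     else if PySem.Set.inter sx (pvGroups.getD "itemlist" []) ≠ [] then "listing"
     else if (["news", "latest", "feed", "лента", "новости"].any (fun tok => PySem.Str.isIn tok raw)) then "news"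
     else if (["docs", "documentation", "api", "руководство", "документац"].any (fun tok => PySem.Str.isIn tok raw)) then "docs"
     else if (["service", "services", "agency", "consulting", "услуги"].any (fun tok => PySem.Str.isIn tok raw)) then "service"
     else if (["catalog", "category", "категор", "products"].any (fun tok => PySem.Str.isIn tok raw)) then "category"
     else "unknown") = pvPick (pvHits raw sx) := by
  have e0 : pvGroups.getD "product" [] = pvG 0 := by decide
  have e1 : pvGroups.getD "review" [] = pvG 1 := by decide
  have e2 : pvGroups.getD "faq" [] = pvG 2 := by decide
  have e3 : pvGroups.getD "article" [] = pvG 3 := by decide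
  have e4 : pvGroups.getD "itemlist" [] = pvG 4 := by decide
  rw [e0, e1, e2, e3, e4]
  split_ifs with h0 h1 h2 h3 h4 h5 h6 h7 h8
  · exact (pv_main raw sx 0 (by omega) (fun _ => pv_posS h0) (fun h => absurd h (by omega))
      (fun i hi _ => absurd hi (by omega)) (fun i hi _ => absurd hi (by omega))).symm
  · refine (pv_main raw sx 1 (by omega) (fun _ => pv_posS h1) (fun h => absurd h (by omega)) ?_ (fun i hi _ => by omega)).symm
    intro i hi _; interval_cases i
    · exact pv_negS h0
  · refine (pv_main raw sx 2 (by omega) (fun _ => pv_posS h2) (fun h => absurd h (by omega)) ?_ (fun i hi _ => by omega)).symm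
    intro i hi _; interval_cases i
    · exact pv_negS h0
    · exact pv_negS h1
  · refine (pv_main raw sx 3 (by omega) (fun _ => pv_posS h3) (fun h => absurd h (by omega)) ?_ (fun i hi _ => by omega)).symm
    intro i hi _; interval_cases i
    · exact pv_negS h0
    · exact pv_negS h1
    · exact pv_negS h2
  · refine (pv_main raw sx 4 (by omega) (fun _ => pv_posS h4) (fun h => absurd h (by omega)) ?_ (fun i hi _ => by omega)).symm
    intro i hi _; interval_cases i
    · exact pv_negS h0
    · exact pv_negS h1
    · exact pv_negS h2
    · exact pv_negS h3
  · refine (pv_main raw sx 5 (by omega) (fun h => absurd h (by omega)) (fun _ => pv_posT h5) ?_ (fun i hi h5i => by omega)).symm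
    intro i _ hi5; interval_cases i
    · exact pv_negS h0
    · exact pv_negS h1
    · exact pv_negS h2
    · exact pv_negS h3
    · exact pv_negS h4
  · refine (pv_main raw sx 6 (by omega) (fun h => absurd h (by omega)) (fun _ => pv_posT h6) ?_ ?_).symm
    · intro i _ hi5; interval_cases i
      · exact pv_negS h0
      · exact pv_negS h1
      · exact pv_negS h2
      · exact pv_negS h3
      · exact pv_negS h4
    · intro i hi h5i; interval_cases i
      · exact pv_negT h5
  · refine (pv_main raw sx 7 (by omega) (fun h => absurd h (by omega)) (fun _ => pv_posT h7) ?_ ?_).symm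
    · intro i _ hi5; interval_cases i
      · exact pv_negS h0
      · exact pv_negS h1
      · exact pv_negS h2
      · exact pv_negS h3
      · exact pv_negS h4
    · intro i hi h5i; interval_cases i
      · exact pv_negT h5
      · exact pv_negT h6
  · refine (pv_main raw sx 8 (by omega) (fun h => absurd h (by omega)) (fun _ => pv_posT h8) ?_ ?_).symm
    · intro i _ hi5; interval_cases i
      · exact pv_negS h0
      · exact pv_negS h1
      · exact pv_negS h2
      · exact pv_negS h3
      · exact pv_negS h4
    · intro i hi h5i; interval_cases i
      · exact pv_negT h5
      · exact pv_negT h6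
      · exact pv_negT h7
  · refine (pv_main_none raw sx ?_ ?_).symm
    · intro i hi5; interval_cases i
      · exact pv_negS h0
      · exact pv_negS h1
      · exact pv_negS h2
      · exact pv_negS h3
      · exact pv_negS h4
    · intro i h5i hi9; interval_cases i
      · exact pv_negT h5
      · exact pv_negT h6
      · exact pv_negT h7
      · exact pv_negT h8

-- ===== VERDICT (by name: the statement is the Claim_ definition above) =====
set_option maxHeartbeats 1000000 in
theorem infer_page_type_py_spec : Claim_equal_infer_page_type_py := by
  intro text schema_idx _
  show infer_page_type_py text schema_idx = infer_page_type_py_alt text schema_idx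
  exact pv_cascade (PySem.Str.lower (if text = "" then "" else text)) schema_idx
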